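-- pv_equiv track=rewrite | github.com/tuandq-cs/coding-pratice | leetcode/week4/interval/insert-interval/solution.py | findOverlapIntervals
-- ===== SOURCE A (Python) =====
-- from typing import List
--
-- def findOverlapIntervals(intervals: List[List[int]], newInterval: List[int]):
--     startIndex = endIndex = None
--     for i, interval in enumerate(intervals):
--         if min(interval[1], newInterval[1]) - max(interval[0], newInterval[0]) >= 0:
--             if startIndex is None:
--                 startIndex = i
--             endIndex = i
--     return startIndex, endIndex
-- ===== SOURCE B (Python) =====
-- from typing import List
--
-- def findOverlapIntervals(intervals: List[List[int]], newInterval: List[int]):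
--     def ov(iv):
--         return min(iv[1], newInterval[1]) >= max(iv[0], newInterval[0])
--     start = None
--     for i, iv in enumerate(intervals):
--         if ov(iv):
--             start = i
--             break
--     if start is None:
--         return None, None
--     for i, iv in reversed(list(enumerate(intervals))):
--         if ov(iv):
--             return start, i
-- ===== Notes on version B (the rewrite author's own statement) =====
-- stated objective: alternative
-- what changed: A makes one full accumulating pass updating start/end state; B does two early-exit searches: a forward scan for the first overlapping index and a backward scan over the reversed enumeration for the last.
import Mathlib
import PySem

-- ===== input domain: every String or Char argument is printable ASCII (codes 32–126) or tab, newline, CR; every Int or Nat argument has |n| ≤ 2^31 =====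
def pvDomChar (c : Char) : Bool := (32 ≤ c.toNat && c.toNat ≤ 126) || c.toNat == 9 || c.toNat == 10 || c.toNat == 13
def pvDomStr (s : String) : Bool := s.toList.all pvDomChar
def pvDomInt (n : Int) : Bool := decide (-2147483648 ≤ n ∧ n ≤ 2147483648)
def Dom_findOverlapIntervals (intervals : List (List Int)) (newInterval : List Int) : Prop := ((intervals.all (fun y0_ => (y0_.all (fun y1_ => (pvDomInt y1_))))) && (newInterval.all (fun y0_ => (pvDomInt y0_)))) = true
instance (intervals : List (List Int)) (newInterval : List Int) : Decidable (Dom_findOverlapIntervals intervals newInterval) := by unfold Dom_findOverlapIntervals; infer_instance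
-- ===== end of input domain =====

-- B replaces A's single full accumulating pass by two early-exit scans (forward find for the
-- first overlapping index, backward find for the last); objective: alternative decomposition.


-- ===== PORT A =====
-- literal port of A's loop; `(pyGet? _ _).getD 0` is exact on Pre_ (there the index is in range;
-- where Python would raise IndexError the input is excluded by Pre_).
def findOverlapIntervals (intervals : List (List Int)) (newInterval : List Int) : Option Int × Option Int :=
  (PySem.List.enumerate intervals).foldl
    (fun (st : Option Int × Option Int) p =>
      if min ((PySem.List.pyGet? p.2 1).getD 0) ((PySem.List.pyGet? newInterval 1).getD 0)
           - max ((PySem.List.pyGet? p.2 0).getD 0) ((PySem.List.pyGet? newInterval 0).getD 0) ≥ 0 then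
        ((if st.1 = none then some p.1 else st.1), some p.1)
      else st)
    (none, none)

-- ===== PORT B =====
-- Source B's helper ov(iv)
def pvOv (newInterval iv : List Int) : Bool :=
  min ((PySem.List.pyGet? iv 1).getD 0) ((PySem.List.pyGet? newInterval 1).getD 0)
    ≥ max ((PySem.List.pyGet? iv 0).getD 0) ((PySem.List.pyGet? newInterval 0).getD 0)

def findOverlapIntervals_alt (intervals : List (List Int)) (newInterval : List Int) : Option Int × Option Int :=
  match (PySem.List.enumerate intervals).find? (fun p => pvOv newInterval p.2) with
  | none => (none, none)
  | some s =>
    match ((PySem.List.enumerate intervals).reverse.find? (fun p => pvOv newInterval p.2)) with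
    | some e => (some s.1, some e.1)
    | none => (some s.1, none)   -- unreachable: the forward scan already found a match

-- ===== PRECONDITION & SPEC =====
-- Pre_ excludes exactly the inputs where Python A raises IndexError: a visited interval (or, once
-- the loop body runs, newInterval) with fewer than 2 elements.
def Pre_findOverlapIntervals (intervals : List (List Int)) (newInterval : List Int) : Prop :=
  intervals = [] ∨ (2 ≤ newInterval.length ∧ intervals.all (fun iv => 2 ≤ iv.length) = true)
instance (intervals : List (List Int)) (newInterval : List Int) : Decidable (Pre_findOverlapIntervals intervals newInterval) := by unfold Pre_findOverlapIntervals; infer_instance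
def pvWitness_findOverlapIntervals : List (List Int) × List Int := ([[1, 3], [6, 9]], [2, 5])
def Spec_findOverlapIntervals (intervals : List (List Int)) (newInterval : List Int) (out : Option Int × Option Int) : Prop := out = findOverlapIntervals_alt intervals newInterval
instance (intervals : List (List Int)) (newInterval : List Int) (out : Option Int × Option Int) : Decidable (Spec_findOverlapIntervals intervals newInterval out) := by unfold Spec_findOverlapIntervals; infer_instance

-- ===== CLAIM (what is proved, stated in full; the proofs are below) =====
def Claim_equal_findOverlapIntervals : Prop := ∀ (intervals : List (List Int)) (newInterval : List Int), Dom_findOverlapIntervals intervals newInterval → Pre_findOverlapIntervals intervals newInterval → Spec_findOverlapIntervals intervals newInterval (findOverlapIntervals intervals newInterval)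

-- ===== LEMMAS AND PROOFS =====

-- A's accumulating fold, over an arbitrary enumerated list and condition, computes
-- (first matching index or the incoming start, last matching index or the incoming end).
theorem pv_foldA (c : Int × List Int → Bool) (L : List (Int × List Int)) (s e : Option Int) :
    L.foldl
      (fun (st : Option Int × Option Int) p =>
        if c p then ((if st.1 = none then some p.1 else st.1), some p.1) else st) (s, e)
    = ((match s with | some v => some v | none => (L.find? c).map Prod.fst),
       (match L.reverse.find? c with | some q => some q.1 | none => e)) := by
  induction L generalizing s e with
  | nil => cases s <;> simp
  | cons p L ih =>
    simp only [List.foldl_cons, List.reverse_cons]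
    by_cases hc : c p = true
    · rw [if_pos hc, ih]
      cases s <;> cases hrev : L.reverse.find? c <;>
        simp [List.find?_append, List.find?_cons, hc, hrev, Option.orElse]
    · rw [if_neg hc, ih]
      cases s <;> cases hrev : L.reverse.find? c <;>
        simp [List.find?_append, List.find?_cons, hc, hrev, Option.orElse]

theorem findOverlapIntervals_spec' (intervals : List (List Int)) (newInterval : List Int) :
    findOverlapIntervals intervals newInterval = findOverlapIntervals_alt intervals newInterval := by
  unfold findOverlapIntervals findOverlapIntervals_alt
  have hcond : ∀ (st : Option Int × Option Int) (p : Int × List Int),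
      (if min ((PySem.List.pyGet? p.2 1).getD 0) ((PySem.List.pyGet? newInterval 1).getD 0)
           - max ((PySem.List.pyGet? p.2 0).getD 0) ((PySem.List.pyGet? newInterval 0).getD 0) ≥ 0 then
        ((if st.1 = none then some p.1 else st.1), some p.1)
      else st)
      = (if pvOv newInterval p.2 then ((if st.1 = none then some p.1 else st.1), some p.1) else st) := by
    intro st p
    have : (min ((PySem.List.pyGet? p.2 1).getD 0) ((PySem.List.pyGet? newInterval 1).getD 0)
           - max ((PySem.List.pyGet? p.2 0).getD 0) ((PySem.List.pyGet? newInterval 0).getD 0) ≥ 0)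
        ↔ pvOv newInterval p.2 = true := by
      simp only [pvOv, ge_iff_le, decide_eq_true_eq]
      omega
    by_cases h : pvOv newInterval p.2 = true
    · rw [if_pos (this.mpr h), if_pos h]
    · rw [if_neg (fun hh => h (this.mp hh)), if_neg h]
  rw [funext fun st => funext fun p => hcond st p]
  rw [pv_foldA (fun p => pvOv newInterval p.2)]
  cases hf : (PySem.List.enumerate intervals).find? (fun p => pvOv newInterval p.2) with
  | none =>
    have hrev : (PySem.List.enumerate intervals).reverse.find? (fun p => pvOv newInterval p.2) = none := by
      rw [List.find?_eq_none] at hf ⊢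
      intro x hx; exact hf x (List.mem_reverse.mp hx)
    simp [hrev]
  | some s =>
    cases hrev : (PySem.List.enumerate intervals).reverse.find? (fun p => pvOv newInterval p.2) with
    | none => simp
    | some e => simp

-- ===== VERDICT (by name: the statement is the Claim_ definition above) =====
theorem findOverlapIntervals_spec : Claim_equal_findOverlapIntervals := by
  intro intervals newInterval _ _
  exact findOverlapIntervals_spec' intervals newInterval
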